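-- pv_equiv track=rewrite | github.com/precice/systemtests | local_test.py | filter_tests
-- ===== SOURCE A (Python) =====
-- def test_is_considered(test, features):
--     test_specializations = test.split('.')
--     test_specializations = test_specializations[1:]  # get specialization of test (e.g. test only for Ubuntu1604)
--     for test_specialization in test_specializations:  # check all specializations of the test whether they are met by features of the base image
--         if not test_specialization in features:
--             # test specialization does not match provided features of base image -> we will not run the test with the provided base image
--             return False
--     return True
--
-- def determine_specialization(test):
--     """
--     The specialization degree of a test is simply determined, by counting the number of appended specializations.
--     Example:
--     test_bindings has specialization degree 1
--     test_bindings.Ubuntu1804 has specialization degree 2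
--     """
--     return test.split('.').__len__()
--
-- def determine_test_name(test):
--     return test.split('.')[0]
--
-- def filter_for_most_specialized_tests(all_tests):
--     """
--     We only want to consider the most specialized test, if several tests are availabe. This function removes duplicate tests and filters for the most specialized version.
--     """
--     most_specialized_tests = {}
--     for test in all_tests:
--         test_name = determine_test_name(test)
--         specialization_degree = determine_specialization(test)
--         if not test_name in most_specialized_tests:  # test has not been added to the dict so far
--             most_specialized_tests[test_name] = test
--         elif determine_specialization(most_specialized_tests[test_name]) < specialization_degree:  # test has already been added to the dict, but the currently evaluated test is more specialized
--             most_specialized_tests[test_name] = test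
--     return most_specialized_tests
--
-- def filter_tests(all_tests, base_dockerfile):
--     base_features = base_dockerfile.split('.')  # put features of base Dockerfile separated by . in a list (e.g. Dockerfile.Ubuntu1604 has feature Ubuntu1604)
--     base_features.remove('Dockerfile')  # remove Dockerfile
--     executed_tests = []
--     for test in all_tests:
--         if test_is_considered(test, base_features):  # check all tests for compatibility with features of base image (e.g. base image with Ubuntu1604 feature cannot run tests with Ubuntu1804 specialization
--             executed_tests.append(test)
--     executed_tests = filter_for_most_specialized_tests(executed_tests)
--     return list(executed_tests.values())
-- ===== SOURCE B (Python) =====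
-- def filter_tests(all_tests, base_dockerfile):
--     base_features = base_dockerfile.split('.')
--     base_features.remove('Dockerfile')
--     groups = {}
--     for test in all_tests:
--         if all(f in base_features for f in test.split('.')[1:]):
--             name = test.split('.')[0]
--             groups[name] = groups.get(name, []) + [test]
--     return [max(group, key=lambda t: len(t.split('.'))) for group in groups.values()]
-- ===== Notes on version B (the rewrite author's own statement) =====
-- stated objective: alternative
-- what changed: B groups the compatible tests into an insertion-ordered dict of lists in one pass and then selects each group's first most-specialized element with max(key=...), instead of A's separate filter pass plus a fused running-best-per-name dict update.
import Mathlib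
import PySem

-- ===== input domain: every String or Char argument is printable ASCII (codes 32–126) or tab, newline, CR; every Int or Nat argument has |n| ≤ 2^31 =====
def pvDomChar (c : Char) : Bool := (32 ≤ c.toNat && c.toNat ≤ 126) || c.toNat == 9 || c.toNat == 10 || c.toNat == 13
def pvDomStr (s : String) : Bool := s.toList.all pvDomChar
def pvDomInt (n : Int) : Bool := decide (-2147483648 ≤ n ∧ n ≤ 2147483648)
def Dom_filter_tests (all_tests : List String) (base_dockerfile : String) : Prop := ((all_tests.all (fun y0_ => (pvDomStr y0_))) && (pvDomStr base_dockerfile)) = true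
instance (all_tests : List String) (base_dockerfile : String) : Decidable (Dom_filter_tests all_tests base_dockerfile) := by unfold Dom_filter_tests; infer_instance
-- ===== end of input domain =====

-- B groups the compatible tests per base name in one dict-building pass and then takes each
-- group's first most-specialized element (max with key), instead of A's fused running-best dict;
-- objective: alternative decomposition (grouping then reduction), same asymptotic cost.

-- ===== PORT A =====
-- s.split('.') : '.' is a non-empty separator, so PySem.Str.split? is always `some` — getD [] is exact
def pvSplit (s : String) : List String := (PySem.Str.split? s ".").getD []

def test_is_considered (test : String) (features : List String) : Bool :=
  (PySem.List.slice (pvSplit test) (some 1) none).all (fun sp => features.contains sp)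

def determine_specialization (test : String) : Int := PySem.List.len (pvSplit test)

def determine_test_name (test : String) : String := PySem.List.pyGetD (pvSplit test) 0 ""

def filter_for_most_specialized_tests (all_tests : List String) : PySem.Dict String String :=
  all_tests.foldl (fun d test =>
    let test_name := determine_test_name test
    if !(d.contains test_name) then d.insert test_name test
    else if determine_specialization (d.getD test_name "") < determine_specialization test then
      d.insert test_name test
    else d) PySem.Dict.empty

def filter_tests (all_tests : List String) (base_dockerfile : String) : List String :=
  match PySem.List.remove? (pvSplit base_dockerfile) "Dockerfile" with
  | none => []  -- ValueError from base_features.remove('Dockerfile'); excluded by Pre_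
  | some base_features =>
      let executed_tests := all_tests.foldl
        (fun acc test => if test_is_considered test base_features then acc ++ [test] else acc) []
      (filter_for_most_specialized_tests executed_tests).values

-- ===== PORT B =====
def pvCompat (features : List String) (t : String) : Bool :=
  ((pvSplit t).drop 1).all features.contains

def pvGroups (features : List String) (all_tests : List String) : PySem.Dict String (List String) :=
  all_tests.foldl (fun g t =>
    if pvCompat features t then
      g.insert (PySem.List.pyGetD (pvSplit t) 0 "")
        (g.getD (PySem.List.pyGetD (pvSplit t) 0 "") [] ++ [t])
    else g) PySem.Dict.empty

def filter_tests_alt (all_tests : List String) (base_dockerfile : String) : List String :=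
  match PySem.List.remove? (pvSplit base_dockerfile) "Dockerfile" with
  | none => []
  | some feats =>
      (pvGroups feats all_tests).values.map
        (fun group => PySem.List.maxD group (fun t => PySem.List.len (pvSplit t)) "")

-- ===== PRECONDITION & SPEC =====
-- Pre_ excludes exactly the inputs where base_features.remove('Dockerfile') raises ValueError
def Pre_filter_tests (all_tests : List String) (base_dockerfile : String) : Prop :=
  "Dockerfile" ∈ (PySem.Str.split? base_dockerfile ".").getD []
instance (all_tests : List String) (base_dockerfile : String) : Decidable (Pre_filter_tests all_tests base_dockerfile) := by unfold Pre_filter_tests; infer_instance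

def pvWitness_filter_tests : List String × String := (["tests.Ubuntu", "tests"], "Dockerfile.Ubuntu")

def Spec_filter_tests (all_tests : List String) (base_dockerfile : String) (out : List String) : Prop := out = filter_tests_alt all_tests base_dockerfile
instance (all_tests : List String) (base_dockerfile : String) (out : List String) : Decidable (Spec_filter_tests all_tests base_dockerfile out) := by unfold Spec_filter_tests; infer_instance

-- ===== CLAIM (what is proved, stated in full; the proofs are below) =====
def Claim_equal_filter_tests : Prop := ∀ (all_tests : List String) (base_dockerfile : String), Dom_filter_tests all_tests base_dockerfile → Pre_filter_tests all_tests base_dockerfile → Spec_filter_tests all_tests base_dockerfile (filter_tests all_tests base_dockerfile)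

-- ===== LEMMAS AND PROOFS =====

-- B's per-group reduction
def pvPick (g : List String) : String :=
  PySem.List.maxD g (fun t => PySem.List.len (pvSplit t)) ""

theorem pvMax?_append_singleton {α κ : Type} [LT κ] [DecidableLT κ] (g : List α) (key : α → κ) (t : α) :
    PySem.List.max? (g ++ [t]) key =
      match PySem.List.max? g key with
      | none => some t
      | some m => if key m < key t then some t else some m := by
  simp only [PySem.List.max?, List.foldl_append, List.foldl_cons, List.foldl_nil]
  rfl

theorem pvPick_append (g : List String) (t : String) (hg : g ≠ []) :
    pvPick (g ++ [t]) =
      if determine_specialization (pvPick g) < determine_specialization t then t else pvPick g := by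
  obtain ⟨m, hm⟩ : ∃ m, PySem.List.max? g (fun t => PySem.List.len (pvSplit t)) = some m := by
    cases hm' : PySem.List.max? g (fun t => PySem.List.len (pvSplit t)) with
    | none => exact absurd ((PySem.List.max?_eq_none_iff _ _).mp hm') hg
    | some m => exact ⟨m, rfl⟩
  have hpg : pvPick g = m := by
    simp only [pvPick, PySem.List.maxD, hm, Option.getD_some]
  rw [hpg]
  simp only [pvPick, PySem.List.maxD, pvMax?_append_singleton, hm, determine_specialization]
  by_cases hlt : (pvSplit m).length < (pvSplit t).length <;> simp [hlt]

-- A's fold step and B's (unguarded) fold step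
def pvStepA (d : PySem.Dict String String) (test : String) : PySem.Dict String String :=
  let test_name := determine_test_name test
  if !(d.contains test_name) then d.insert test_name test
  else if determine_specialization (d.getD test_name "") < determine_specialization test then
    d.insert test_name test
  else d

def pvStepG (g : PySem.Dict String (List String)) (t : String) : PySem.Dict String (List String) :=
  g.insert (PySem.List.pyGetD (pvSplit t) 0 "")
    (g.getD (PySem.List.pyGetD (pvSplit t) 0 "") [] ++ [t])

def pvF (p : String × List String) : String × String := (p.1, pvPick p.2)

theorem pvMain (L : List String) (dA : PySem.Dict String String) (dG : PySem.Dict String (List String))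
    (hnd : dG.keys.Nodup)
    (hrel : dA.items = dG.items.map pvF)
    (hne : ∀ p ∈ dG.items, p.2 ≠ []) :
    (L.foldl pvStepA dA).items = (L.foldl pvStepG dG).items.map pvF := by
  induction L generalizing dA dG with
  | nil => exact hrel
  | cons t L ih =>
    simp only [List.foldl_cons]
    have hkeys : dA.keys = dG.keys := by
      simp only [PySem.Dict.keys, hrel, List.map_map]
      rfl
    set n := PySem.List.pyGetD (pvSplit t) 0 "" with hn
    have hnameA : determine_test_name t = n := rfl
    have hcont : dA.contains n = dG.contains n := by
      classical
      rw [PySem.Dict.contains_eq_decide_mem_keys, PySem.Dict.contains_eq_decide_mem_keys, hkeys]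
    by_cases hc : dG.contains n = true
    · -- key present in both dicts
      have hcA : dA.contains n = true := by rw [hcont]; exact hc
      obtain ⟨g, hg⟩ : ∃ g, dG.get? n = some g := by
        have := PySem.Dict.contains_eq_isSome_get? (d := dG) (k := n)
        rw [hc] at this
        exact Option.isSome_iff_exists.mp this.symm
      have hmemG : (n, g) ∈ dG.items := PySem.Dict.mem_items_of_get?_eq_some dG hg
      have hgne : g ≠ [] := hne _ hmemG
      have hndA : dA.keys.Nodup := by rw [hkeys]; exact hnd
      have hmemA : (n, pvPick g) ∈ dA.items := by
        rw [hrel]; exact List.mem_map.mpr ⟨(n, g), hmemG, rfl⟩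
      have hgetA : dA.getD n "" = pvPick g := PySem.Dict.getD_of_mem_items dA hmemA hndA ""
      have hgetG : dG.getD n [] = g := PySem.Dict.getD_of_get?_eq_some dG [] hg
      have hstepG : (pvStepG dG t).items =
          dG.items.map (fun p => if p.1 == n then (n, g ++ [t]) else p) := by
        simp only [pvStepG, ← hn, hgetG]
        exact PySem.Dict.items_insert_of_contains dG _ hc
      have hpick : pvPick (g ++ [t]) =
          if determine_specialization (pvPick g) < determine_specialization t then t else pvPick g :=
        pvPick_append g t hgne
      have hnew : (pvStepA dA t).items = ((pvStepG dG t).items).map pvF := by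
        rw [hstepG, List.map_map]
        simp only [pvStepA, hnameA, hcA, Bool.not_true, Bool.false_eq_true, if_false, hgetA]
        by_cases hlt : determine_specialization (pvPick g) < determine_specialization t
        · rw [if_pos hlt]
          rw [PySem.Dict.items_insert_of_contains dA _ hcA, hrel, List.map_map]
          apply List.map_congr_left
          intro p hp
          by_cases hpn : p.1 = n
          · simp [Function.comp, pvF, hpn, hpick, hlt]
          · simp [Function.comp, pvF, hpn]
        · rw [if_neg hlt, hrel]
          apply List.map_congr_left
          intro p hp
          by_cases hpn : p.1 = n
          · have : p.2 = g := by
              have hget : dG.get? p.1 = some p.2 := PySem.Dict.get?_of_mem_items dG hp hnd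
              rw [hpn, hg] at hget
              exact (Option.some_inj.mp hget).symm
            simp [Function.comp, pvF, hpn, this, hpick, hlt]
          · simp [Function.comp, pvF, hpn]
      refine ih (pvStepA dA t) (pvStepG dG t) ?_ hnew ?_
      · have : (pvStepG dG t).keys = dG.keys := by
          simp only [PySem.Dict.keys, hstepG, List.map_map]
          apply List.map_congr_left
          intro p hp
          by_cases hpn : p.1 = n <;> simp [Function.comp, hpn]
        rw [this]; exact hnd
      · intro p hp
        rw [hstepG] at hp
        obtain ⟨q, hq, hqe⟩ := List.mem_map.mp hp
        by_cases hqn : q.1 = n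
        · simp only [hqn, beq_self_eq_true, if_true] at hqe
          rw [← hqe]; simp
        · simp only [ne_eq] at *
          rw [if_neg (by simp [hqn])] at hqe
          rw [← hqe]; exact hne _ hq
    · -- fresh key in both dicts
      have hc' : dG.contains n = false := by simpa using hc
      have hcA : dA.contains n = false := by rw [hcont]; exact hc'
      have hstepA : (pvStepA dA t).items = dA.items ++ [(n, t)] := by
        simp only [pvStepA, hnameA, hcA, Bool.not_false, if_true]
        exact PySem.Dict.items_insert_of_not_contains dA _ hcA
      have hgetG : dG.getD n [] = [] := PySem.Dict.getD_of_not_contains dG [] hc'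
      have hstepG : (pvStepG dG t).items = dG.items ++ [(n, [t])] := by
        simp only [pvStepG, ← hn, hgetG, List.nil_append]
        exact PySem.Dict.items_insert_of_not_contains dG _ hc'
      refine ih (pvStepA dA t) (pvStepG dG t) ?_ ?_ ?_
      · have : (pvStepG dG t).keys = dG.keys ++ [n] := by
          simp only [PySem.Dict.keys, hstepG, List.map_append]; rfl
        have hnot : n ∉ dG.keys := by
          intro hmem
          rw [(PySem.Dict.contains_iff_mem_keys dG n).mpr hmem] at hc'
          cases hc'
        rw [this]
        refine List.Nodup.append hnd (List.nodup_singleton n) ?_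
        intro a ha hb
        rw [List.mem_singleton] at hb
        subst hb
        exact hnot ha
      · rw [hstepA, hstepG, hrel, List.map_append]
        have : pvPick [t] = t := rfl
        simp [pvF, this]
      · intro p hp
        rw [hstepG] at hp
        rcases List.mem_append.mp hp with h | h
        · exact hne _ h
        · simp only [List.mem_singleton] at h; rw [h]; simp

-- ===== VERDICT (by name: the statement is the Claim_ definition above) =====
theorem filter_tests_spec : Claim_equal_filter_tests := by
  intro all_tests base_dockerfile _hdom hpre
  unfold Spec_filter_tests filter_tests filter_tests_alt
  cases hrm : PySem.List.remove? (pvSplit base_dockerfile) "Dockerfile" with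
  | none =>
    -- Pre_ says 'Dockerfile' is among the split features, so remove? cannot be none
    exact absurd hpre ((PySem.List.remove?_eq_none_iff _ _).mp hrm)
  | some feats =>
    simp only
    -- the two compatibility predicates agree
    have hpred : ∀ t, test_is_considered t feats = pvCompat feats t := by
      intro t
      simp only [test_is_considered, pvCompat, PySem.List.slice_from_one, List.drop_one]
    -- A filters then folds; B folds with a guard = folds over the filtered list
    have hA : all_tests.foldl
        (fun acc test => if test_is_considered test feats then acc ++ [test] else acc) [] =
        all_tests.filter (fun t => pvCompat feats t) := by
      rw [PySem.List.foldl_append_if_eq_filter]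
      simp only [List.nil_append]
      apply List.filter_congr
      intro t _
      exact hpred t
    have hB : pvGroups feats all_tests =
        (all_tests.filter (fun t => pvCompat feats t)).foldl pvStepG PySem.Dict.empty := by
      unfold pvGroups pvStepG
      rw [PySem.List.foldl_if_eq_foldl_filter]
    rw [hA, hB]
    have hmain := pvMain (all_tests.filter (fun t => pvCompat feats t))
      PySem.Dict.empty PySem.Dict.empty (by simp)
      (by rfl) (by intro p hp; simp [PySem.Dict.empty] at hp)
    have hfold : filter_for_most_specialized_tests (all_tests.filter (fun t => pvCompat feats t)) =
        (all_tests.filter (fun t => pvCompat feats t)).foldl pvStepA PySem.Dict.empty := rfl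
    rw [hfold]
    simp only [PySem.Dict.values, hmain, List.map_map]
    rfl
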